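-- pv_equiv track=rewrite | github.com/tituka/ads_similarity | suggestions/tools/text_tools.py | find_compound
-- ===== SOURCE A (Python) =====
-- def find_compound(token:str, ind:int,  token_list:list, word_vectors):
--     """Returns a compound token made up of token and the next after that, when one is found in the word vector model"""
--     longer=False
--     newt = token
--     n=1
--     all_longs=[x for x in all_concat(token_list[ind:]) if x[0] in word_vectors]
--     if not all_longs==[]:
--         best_all=max(all_longs, key=lambda x: x[1])
--         best_token=best_all[0]
--         best_len=best_all[1]
--     else:
--         best_token = token
--         best_len = 1
--     return best_token, best_len
--
-- def all_concat(token_list):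
--     all_list=[]
--     for i in range(len(token_list)):
--         all_list.append([('_').join(token_list[:i+1]), i])
--     return(all_list)
-- ===== SOURCE B (Python) =====
-- def find_compound(token: str, ind: int, token_list: list, word_vectors):
--     """Returns a compound token made up of token and the next after that, when one is found in the word vector model"""
--     wv = set(word_vectors)
--     best = (token, 1)
--     cur = None
--     i = 0
--     for t in token_list[ind:]:
--         cur = t if cur is None else cur + "_" + t
--         if cur in wv:
--             best = (cur, i)
--         i += 1
--     return best
-- ===== Notes on version B (the rewrite author's own statement) =====
-- stated objective: alternative
-- what changed: A materialises every prefix concatenation via all_concat, filters by list membership and takes max(key=index); B makes one incremental pass over the suffix, extending the concatenation and keeping the last prefix found in a set of the word vectors.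
import Mathlib
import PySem

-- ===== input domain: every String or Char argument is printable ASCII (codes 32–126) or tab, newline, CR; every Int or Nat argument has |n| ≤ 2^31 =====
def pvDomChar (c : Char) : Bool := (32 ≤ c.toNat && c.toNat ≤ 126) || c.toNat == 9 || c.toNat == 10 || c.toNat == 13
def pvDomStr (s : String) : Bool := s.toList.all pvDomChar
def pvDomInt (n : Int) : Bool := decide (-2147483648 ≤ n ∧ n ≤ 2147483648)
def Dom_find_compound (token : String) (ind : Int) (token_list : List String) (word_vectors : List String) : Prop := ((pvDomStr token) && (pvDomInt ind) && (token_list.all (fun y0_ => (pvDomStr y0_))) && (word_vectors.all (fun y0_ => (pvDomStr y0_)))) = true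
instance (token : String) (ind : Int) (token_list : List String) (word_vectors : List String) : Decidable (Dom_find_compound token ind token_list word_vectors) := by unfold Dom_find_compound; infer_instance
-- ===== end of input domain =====

-- B replaces A's build-all-prefixes / filter / max(key=index) pipeline by a single incremental
-- pass with a set for membership (objective: alternative).


-- ===== PORT A =====
-- helper all_concat: for i in range(len(token_list)): append ['_'.join(token_list[:i+1]), i]
def all_concat (token_list : List String) : List (String × Int) :=
  (PySem.List.pyRange 0 (token_list.length : Int) 1).foldl
    (fun all_list i =>
      all_list ++ [(PySem.Str.join "_" (PySem.List.slice token_list none (some (i + 1))), i)])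
    []

def find_compound (token : String) (ind : Int) (token_list : List String) (word_vectors : List String) : String × Int :=
  let all_longs := (all_concat (PySem.List.slice token_list (some ind) none)).filter
    (fun x => word_vectors.contains x.1)
  if all_longs = [] then (token, 1)
  else
    match PySem.List.max? all_longs (fun x => x.2) with
    | some best_all => (best_all.1, best_all.2)
    | none => (token, 1)   -- unreachable: all_longs ≠ []

-- ===== PORT B =====
-- the for-loop of Source B over token_list[ind:], carrying (best, cur, i)
def fcLoop (wv : PySem.Set String) (best : String × Int) (cur : Option String) (i : Int) :
    List String → String × Int
  | [] => best
  | t :: rest =>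
    let c := match cur with | none => t | some s => s ++ "_" ++ t
    fcLoop wv (if PySem.Set.contains wv c then (c, i) else best) (some c) (i + 1) rest

def find_compound_alt (token : String) (ind : Int) (token_list : List String) (word_vectors : List String) : String × Int :=
  fcLoop (PySem.Set.ofList word_vectors) (token, 1) none 0
    (PySem.List.slice token_list (some ind) none)

-- ===== PRECONDITION & SPEC =====
def Spec_find_compound (token : String) (ind : Int) (token_list : List String) (word_vectors : List String) (out : String × Int) : Prop := out = find_compound_alt token ind token_list word_vectors
instance (token : String) (ind : Int) (token_list : List String) (word_vectors : List String) (out : String × Int) : Decidable (Spec_find_compound token ind token_list word_vectors out) := by unfold Spec_find_compound; infer_instance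

-- ===== CLAIM (what is proved, stated in full; the proofs are below) =====
def Claim_equal_find_compound : Prop := ∀ (token : String) (ind : Int) (token_list : List String) (word_vectors : List String), Dom_find_compound token ind token_list word_vectors → Spec_find_compound token ind token_list word_vectors (find_compound token ind token_list word_vectors)

-- ===== LEMMAS AND PROOFS =====

-- A's prefix list in map form
theorem all_concat_eq_map (tl : List String) :
    all_concat tl = (List.range tl.length).map
      (fun k => (PySem.Str.join "_" (tl.take (k + 1)), (k : Int))) := by
  unfold all_concat
  rw [PySem.List.pyRange_zero_natCast]
  rw [PySem.List.foldl_append_singleton_eq_map]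
  simp [List.map_map, Function.comp]
  intro k hk
  have : ((k : Int) + 1) = ((k + 1 : Nat) : Int) := by push_cast; ring
  rw [this, PySem.List.slice_to_natCast]

-- '_'.join of a snoc, on the character level
theorem chars_join_snoc (sep t : List Char) (p : List Char) (ps : List (List Char)) :
    PySem.Chars.join sep ((p :: ps) ++ [t]) = PySem.Chars.join sep (p :: ps) ++ sep ++ t := by
  induction ps generalizing p with
  | nil => simp [PySem.Chars.join_cons_cons, PySem.Chars.join_singleton]
  | cons q qs ih =>
      have h1 := PySem.Chars.join_cons_cons sep p q (qs ++ [t])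
      have h2 := PySem.Chars.join_cons_cons sep p q qs
      simp only [List.cons_append] at h1 ih ⊢
      rw [h1, ih q, h2]
      simp [List.append_assoc]

-- '_'.join of a snoc = B's incremental concatenation step
theorem join_snoc (pre : List String) (t : String) :
    PySem.Str.join "_" (pre ++ [t]) =
      (match (match pre with | [] => (none : Option String) | _ => some (PySem.Str.join "_" pre)) with
       | none => t
       | some s => s ++ "_" ++ t) := by
  cases pre with
  | nil => apply String.toList_inj.mp; simp [PySem.Str.toList_join, PySem.Chars.join_singleton]
  | cons p ps =>
      apply String.toList_inj.mp
      simp only [PySem.Str.toList_join, List.map_append, List.map_cons, String.toList_append]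
      exact chars_join_snoc _ _ _ _

-- B's loop is the "keep the last match" fold over the prefix pair list
theorem fcLoop_eq_fold (wv : PySem.Set String) (xs : List String) :
    ∀ (pre : List String) (best : String × Int) (i : Int),
    fcLoop wv best (match pre with | [] => none | _ => some (PySem.Str.join "_" pre)) i xs =
      ((List.range xs.length).map
        (fun k => (PySem.Str.join "_" (pre ++ xs.take (k + 1)), i + (k : Int)))).foldl
        (fun b x => if PySem.Set.contains wv x.1 then x else b) best := by
  induction xs with
  | nil => intro pre best i; simp [fcLoop]
  | cons t r ih =>
      intro pre best i
      rw [List.length_cons, List.range_succ_eq_map, List.map_cons, List.map_map, List.foldl_cons]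
      have hc : (match (match pre with | [] => (none : Option String) | _ => some (PySem.Str.join "_" pre)) with
                 | none => t
                 | some s => s ++ "_" ++ t) = PySem.Str.join "_" (pre ++ [t]) := (join_snoc pre t).symm
      have hmap : ((fun k => (PySem.Str.join "_" (pre ++ (t :: r).take (k + 1)), i + (k : Int))) ∘ (fun k => k + 1)) =
          (fun k => (PySem.Str.join "_" ((pre ++ [t]) ++ r.take (k + 1)), (i + 1) + (k : Int))) := by
        funext k
        simp [List.take_succ_cons, List.append_assoc]
        ring
      rw [fcLoop.eq_def]
      simp only [hc]
      have hsome : (some (PySem.Str.join "_" (pre ++ [t]))) =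
          (match pre ++ [t] with | [] => (none : Option String) | _ => some (PySem.Str.join "_" (pre ++ [t]))) := by
        cases pre <;> rfl
      rw [hsome, ih (pre ++ [t]) _ (i + 1), hmap]
      simp [List.take_succ_cons]

theorem getLast?_cons_eq_getLastD {α : Type} (x : α) (t : List α) :
    (x :: t).getLast? = some (t.getLastD x) := by
  induction t generalizing x with
  | nil => rfl
  | cons y r ih => rw [List.getLastD_cons, ← ih y]; cases r <;> rfl

-- Python max(key) over a strictly key-increasing list is its last element
theorem max?_cons_eq (t : List (String × Int)) :
    ∀ m : String × Int, (m :: t).Pairwise (fun a b => a.2 < b.2) →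
    PySem.List.max? (m :: t) (fun x => x.2) = some (t.getLastD m) := by
  induction t with
  | nil => intro m _; simp [PySem.List.max?]
  | cons y r ih =>
      intro m hp
      have hmy : m.2 < y.2 := (List.pairwise_cons.mp hp).1 y (by simp)
      have h1 : PySem.List.max? (m :: y :: r) (fun x : String × Int => x.2) =
          PySem.List.max? (y :: r) (fun x : String × Int => x.2) := by
        simp [PySem.List.max?, hmy]
      rw [h1, ih y (List.pairwise_cons.mp hp).2, ← List.getLastD_cons]

theorem max?_eq_getLast? (L : List (String × Int))
    (h : L.Pairwise (fun a b => a.2 < b.2)) :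
    PySem.List.max? L (fun x => x.2) = L.getLast? := by
  cases L with
  | nil => simp [PySem.List.max?]
  | cons x t => rw [max?_cons_eq t x h, getLast?_cons_eq_getLastD]

-- the "keep the last match" fold = last element of the filtered list (or the default)
theorem foldl_if_eq_getLastD (p : String × Int → Bool) (L : List (String × Int)) :
    ∀ (d : String × Int),
    L.foldl (fun b x => if p x then x else b) d = (L.filter p).getLastD d := by
  induction L with
  | nil => intro d; simp
  | cons x t ih =>
      intro d
      simp only [List.foldl_cons, List.filter_cons]
      by_cases h : p x
      · rw [if_pos h, if_pos h, ih x, List.getLastD_cons]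
      · rw [if_neg h, if_neg h, ih d]

-- membership in set(xs) = membership in xs
theorem contains_ofList (xs : List String) (y : String) :
    List.contains (PySem.Set.ofList xs) y = List.contains xs y := by
  by_cases h : y ∈ xs <;> simp [h, (PySem.Set.mem_ofList xs y)]

-- ===== VERDICT (by name: the statement is the Claim_ definition above) =====
theorem find_compound_spec : Claim_equal_find_compound := by
  intro token ind tl wvs _
  unfold Spec_find_compound find_compound find_compound_alt
  have hB := fcLoop_eq_fold (PySem.Set.ofList wvs) (PySem.List.slice tl (some ind) none)
    [] (token, 1) 0
  simp only [List.nil_append] at hB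
  rw [hB]
  set xs := PySem.List.slice tl (some ind) none with hxs
  set M := (List.range xs.length).map
    (fun k => (PySem.Str.join "_" (xs.take (k + 1)), (k : Int))) with hM
  have hM0 : (List.range xs.length).map
      (fun k => (PySem.Str.join "_" (xs.take (k + 1)), (0 : Int) + (k : Int))) = M := by
    rw [hM]; simp
  rw [hM0]
  have hfun : M.foldl (fun b x => if PySem.Set.contains (PySem.Set.ofList wvs) x.1 then x else b) (token, 1)
      = M.foldl (fun b x => if wvs.contains x.1 then x else b) (token, 1) := by
    congr 1
    funext b x
    rw [show PySem.Set.contains (PySem.Set.ofList wvs) x.1 = wvs.contains x.1 from contains_ofList wvs x.1]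
  rw [hfun, foldl_if_eq_getLastD]
  have hpw : M.Pairwise (fun a b : String × Int => a.2 < b.2) := by
    rw [hM, List.pairwise_map]
    exact List.pairwise_lt_range.imp (by intro a b h; simpa using Int.ofNat_lt.mpr h)
  rw [all_concat_eq_map xs, ← hM]
  set F := M.filter (fun x => wvs.contains x.1) with hF
  cases hc : F with
  | nil => rw [if_pos rfl]; rfl
  | cons z t =>
      rw [if_neg (by simp)]
      rw [max?_eq_getLast? (z :: t) (hc ▸ hpw.filter _), getLast?_cons_eq_getLastD,
          List.getLastD_cons]
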